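-- pv_equiv track=rewrite | github.com/ocarl/aoc2019 | d8a.py | decode_img
-- ===== SOURCE A (Python) =====
-- def decode_img(image, dim):
--     layers = []
--     image_it = iter(str(image))
--     while True:
--         try:
--             pixels = []
--             for _ in range(dim[1]):
--                 pixel = []
--                 for _ in range(dim[0]):
--                     pixel.append(next(image_it))
--                 pixels.append(''.join(pixel))
--             layers.append(pixels)
--         except StopIteration:
--             break
--     return layers
-- ===== SOURCE B (Python) =====
-- def decode_img(image, dim):
--     s = str(image)
--     w, h = dim[0], dim[1]
--     layer_size = w * h
--     n = len(s) // layer_size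
--     layers = []
--     for i in range(n):
--         block = s[i * layer_size:(i + 1) * layer_size]
--         layers.append([block[r * w:(r + 1) * w] for r in range(h)])
--     return layers
-- ===== Notes on version B (the rewrite author's own statement) =====
-- stated objective: simpler
-- what changed: B computes the number of complete layers as len(s)//(w*h) up front and builds each layer by slicing (block and row slices) instead of A's char-by-char iterator consumption with a try/except StopIteration break
-- outside the precondition, e.g. on decode_img('123', (0, 2)): A does not finish within the time limit, B raises ZeroDivisionError; on decode_img('123', (2, -1)): A does not finish within the time limit, B returns []
import Mathlib
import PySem

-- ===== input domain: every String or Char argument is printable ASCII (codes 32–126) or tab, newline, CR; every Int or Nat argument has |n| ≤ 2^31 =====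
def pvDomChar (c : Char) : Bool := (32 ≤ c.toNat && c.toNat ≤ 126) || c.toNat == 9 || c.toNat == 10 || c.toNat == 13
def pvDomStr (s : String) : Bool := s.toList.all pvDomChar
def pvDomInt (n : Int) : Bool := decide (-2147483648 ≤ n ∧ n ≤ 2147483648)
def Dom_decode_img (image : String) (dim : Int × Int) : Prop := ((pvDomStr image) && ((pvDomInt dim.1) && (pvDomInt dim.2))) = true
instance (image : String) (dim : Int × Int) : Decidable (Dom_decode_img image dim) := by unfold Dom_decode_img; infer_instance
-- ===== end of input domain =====

-- B replaces A's char-by-char iterator with StopIteration break by a computed layer count and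
-- slicing (objective: simpler); equivalence is claimed on positive dimensions (Pre_), where A terminates.

-- ===== PORT A =====
-- inner loop: for _ in range(dim[0]): pixel.append(next(image_it))  (none = StopIteration)
def pvARow : Nat → List Char → List Char → Option (List Char × List Char)
  | 0, pixel, it => some (pixel, it)
  | n + 1, pixel, it =>
    match it with
    | [] => none
    | c :: it' => pvARow n (pixel ++ [c]) it'

-- middle loop: for _ in range(dim[1]): read a row, pixels.append(''.join(pixel))
def pvALayer (w : Nat) : Nat → List String → List Char → Option (List String × List Char)
  | 0, pixels, it => some (pixels, it)
  | n + 1, pixels, it =>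
    match pvARow w [] it with
    | none => none
    | some (pixel, it') => pvALayer w n (pixels ++ [String.mk pixel]) it'

-- while True: try one layer; on StopIteration break.  The fuel (image length + 1) only makes the
-- recursion total; under Pre_ the loop stops by itself before the fuel runs out.
def pvALoop (w h : Nat) : Nat → List Char → List (List String) → List (List String)
  | 0, _, layers => layers
  | fuel + 1, it, layers =>
    match pvALayer w h [] it with
    | none => layers
    | some (pixels, it') => pvALoop w h fuel it' (layers ++ [pixels])

def decode_img (image : String) (dim : Int × Int) : List (List String) :=
  pvALoop dim.1.toNat dim.2.toNat (image.toList.length + 1) image.toList []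

-- ===== PORT B =====
-- the 'if ls = 0 then 0' guard only totalises len(s) // layer_size (Python raises there; outside Pre_)
def decode_img_alt (image : String) (dim : Int × Int) : List (List String) :=
  let s := image.toList
  let w := dim.1
  let h := dim.2
  let ls := w * h
  let n := if ls = 0 then 0 else PySem.Int.floordiv (s.length : Int) ls
  (PySem.List.pyRange 0 n 1).map (fun i =>
    let block := PySem.List.slice s (some (i * ls)) (some ((i + 1) * ls))
    (PySem.List.pyRange 0 h 1).map (fun r =>
      String.mk (PySem.List.slice block (some (r * w)) (some ((r + 1) * w)))))

-- ===== PRECONDITION & SPEC =====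
-- Pre_ excludes non-positive dimensions: there A never returns (its while-loop consumes no input and
-- spins forever), and B raises ZeroDivisionError when w*h = 0 (and returns [] for other non-positive dims).
def Pre_decode_img (image : String) (dim : Int × Int) : Prop := 1 ≤ dim.1 ∧ 1 ≤ dim.2
instance (image : String) (dim : Int × Int) : Decidable (Pre_decode_img image dim) := by unfold Pre_decode_img; infer_instance
def pvWitness_decode_img : String × (Int × Int) := ("123456", (3, 2))

def Spec_decode_img (image : String) (dim : Int × Int) (out : List (List String)) : Prop := out = decode_img_alt image dim
instance (image : String) (dim : Int × Int) (out : List (List String)) : Decidable (Spec_decode_img image dim out) := by unfold Spec_decode_img; infer_instance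

-- ===== CLAIM (what is proved, stated in full; the proofs are below) =====
def Claim_equal_decode_img : Prop := ∀ (image : String) (dim : Int × Int), Dom_decode_img image dim → Pre_decode_img image dim → Spec_decode_img image dim (decode_img image dim)

-- ===== LEMMAS AND PROOFS =====

-- the common closed form of both programs
def pvLayersOf (w h : Nat) (s : List Char) : List (List String) :=
  (List.range (s.length / (w * h))).map (fun i =>
    (List.range h).map (fun r => String.mk ((s.drop (i * (w * h) + r * w)).take w)))

theorem pvARow_eq (w : Nat) (pixel it : List Char) :
    pvARow w pixel it =
      if w ≤ it.length then some (pixel ++ it.take w, it.drop w) else none := by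
  induction w generalizing pixel it with
  | zero => simp [pvARow]
  | succ n ih =>
    cases it with
    | nil => simp [pvARow]
    | cons c it' =>
      simp only [pvARow, ih, List.length_cons, List.take_succ_cons, List.drop_succ_cons]
      split_ifs with h1 h2 h2 <;> simp_all <;> omega

theorem pvALayer_eq (w h : Nat) (pixels : List String) (it : List Char) :
    pvALayer w h pixels it =
      if w * h ≤ it.length then
        some (pixels ++ (List.range h).map (fun r => String.mk ((it.drop (r * w)).take w)),
              it.drop (w * h))
      else none := by
  induction h generalizing pixels it with
  | zero => simp [pvALayer]
  | succ n ih =>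
    have hmul : w * (n + 1) = w * n + w := by ring
    simp only [pvALayer, pvARow_eq]
    by_cases hw : w ≤ it.length
    · rw [if_pos hw]
      simp only [List.nil_append, ih, List.length_drop]
      by_cases hrest : w * n ≤ it.length - w
      · rw [if_pos hrest, if_pos (by omega)]
        have hdd : List.drop (w * n) (List.drop w it) = List.drop (w * (n + 1)) it := by
          rw [List.drop_drop]; congr 1; ring
        have hmap : (List.range n).map
              (fun r => String.mk (((List.drop w it).drop (r * w)).take w)) =
            (List.range n).map
              ((fun r => String.mk ((it.drop (r * w)).take w)) ∘ Nat.succ) := by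
          apply List.map_congr_left
          intro r _
          simp only [Function.comp_apply, List.drop_drop, Nat.succ_eq_add_one]
          congr 2
          ring
        rw [hdd, hmap, List.range_succ_eq_map, List.map_cons, List.map_map, List.append_assoc]
        simp only [Nat.zero_mul, List.drop_zero, List.singleton_append]
      · rw [if_neg hrest, if_neg (by omega)]
    · rw [if_neg hw, if_neg (by omega)]

theorem pvALoop_eq (w h : Nat) (hwh : 0 < w * h) (fuel : Nat) (it : List Char)
    (layers : List (List String)) (hfuel : it.length < fuel) :
    pvALoop w h fuel it layers = layers ++ pvLayersOf w h it := by
  induction fuel generalizing it layers with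
  | zero => omega
  | succ f ih =>
    simp only [pvALoop, pvALayer_eq, List.nil_append]
    by_cases hle : w * h ≤ it.length
    · rw [if_pos hle]
      dsimp only
      rw [ih (it.drop (w * h)) _ (by simp; omega)]
      rw [List.append_assoc, List.singleton_append]
      congr 1
      unfold pvLayersOf
      have hq : it.length / (w * h) = (it.drop (w * h)).length / (w * h) + 1 := by
        rw [List.length_drop]
        exact Nat.div_eq_sub_div hwh hle
      rw [hq, List.range_succ_eq_map, List.map_cons, List.map_map]
      congr 1
      · simp
      · apply List.map_congr_left
        intro i _
        simp only [Function.comp_apply, Nat.succ_eq_add_one]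
        apply List.map_congr_left
        intro r _
        rw [List.drop_drop]
        congr 2
        ring
    · rw [if_neg hle]
      unfold pvLayersOf
      rw [Nat.div_eq_of_lt (by omega)]
      simp

theorem pvB_eq (s : List Char) (W H : Nat) (hW : 1 ≤ W) :
    ((PySem.List.pyRange 0 (PySem.Int.floordiv (s.length : Int) ((W : Int) * (H : Int))) 1).map
      (fun i =>
        (PySem.List.pyRange 0 (H : Int) 1).map (fun r =>
          String.mk (PySem.List.slice
            (PySem.List.slice s (some (i * ((W : Int) * (H : Int))))
              (some ((i + 1) * ((W : Int) * (H : Int)))))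
            (some (r * (W : Int))) (some ((r + 1) * (W : Int))))))) =
    pvLayersOf W H s := by
  have hcast : (W : Int) * (H : Int) = ((W * H : Nat) : Int) := by push_cast; ring
  rw [hcast, PySem.Int.floordiv_natCast, PySem.List.pyRange_zero_natCast,
      PySem.List.pyRange_zero_natCast, pvLayersOf, List.map_map]
  apply List.map_congr_left
  intro i _
  simp only [Function.comp_apply, List.map_map]
  have h1 : (i : Int) * ((W * H : Nat) : Int) = ((i * (W * H) : Nat) : Int) := by push_cast; ring
  have h2 : ((i : Int) + 1) * ((W * H : Nat) : Int) = ((i * (W * H) + W * H : Nat) : Int) := by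
    push_cast; ring
  rw [h1, h2, PySem.List.slice_natCast]
  apply List.map_congr_left
  intro r hr
  simp only [List.mem_range] at hr
  have h3 : (r : Int) * (W : Int) = ((r * W : Nat) : Int) := by push_cast; ring
  have h4 : ((r : Int) + 1) * (W : Int) = ((r * W + W : Nat) : Int) := by push_cast; ring
  have hrW : r * W + W ≤ W * H := by
    have := Nat.mul_le_mul_right W hr
    nlinarith
  simp only [Function.comp_apply, h3, h4, PySem.List.slice_natCast]
  rw [List.drop_take, List.drop_drop, List.take_take]
  congr 2 <;> omega

-- ===== VERDICT (by name: the statement is the Claim_ definition above) =====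
theorem decode_img_spec : Claim_equal_decode_img := by
  intro image dim _ hpre
  obtain ⟨hw, hh⟩ := hpre
  unfold Spec_decode_img decode_img decode_img_alt
  set W := dim.1.toNat with hWdef
  set H := dim.2.toNat with hHdef
  have hW1 : 1 ≤ W := by omega
  have hH1 : 1 ≤ H := by omega
  have hdim1 : dim.1 = (W : Int) := by omega
  have hdim2 : dim.2 = (H : Int) := by omega
  have hls : ¬ ((W : Int) * (H : Int) = 0) := by positivity
  simp only [hdim1, hdim2]
  rw [if_neg hls, pvALoop_eq W H (Nat.mul_pos hW1 hH1) _ _ _ (by omega), List.nil_append]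
  exact (pvB_eq image.toList W H hW1).symm
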